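-- pv_equiv track=rewrite | github.com/omermerm/AdventOfCode | 2021/Day 9.py | cone_size
-- ===== SOURCE A (Python) =====
-- def cone_size(digraph, node):
--     visited = {node}
--     stack = [node]
--     while(stack != []):
--         cur = stack.pop(-1)
--         for child in digraph[cur]:
--             if child not in visited:
--                 visited.add(child)
--                 stack.append(child)
--     return len(visited)
-- ===== SOURCE B (Python) =====
-- def cone_size(digraph, node):
--     visited = {node}
--     frontier = {node}
--     while frontier:
--         frontier = {c for v in frontier for c in digraph[v]} - visited
--         visited |= frontier
--     return len(visited)
-- ===== Notes on version B (the rewrite author's own statement) =====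
-- stated objective: alternative
-- what changed: Replaces the explicit-stack DFS with per-child membership tests by a frontier-based level BFS expressed in whole-set operations (set comprehension, set difference, set union).
import Mathlib
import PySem

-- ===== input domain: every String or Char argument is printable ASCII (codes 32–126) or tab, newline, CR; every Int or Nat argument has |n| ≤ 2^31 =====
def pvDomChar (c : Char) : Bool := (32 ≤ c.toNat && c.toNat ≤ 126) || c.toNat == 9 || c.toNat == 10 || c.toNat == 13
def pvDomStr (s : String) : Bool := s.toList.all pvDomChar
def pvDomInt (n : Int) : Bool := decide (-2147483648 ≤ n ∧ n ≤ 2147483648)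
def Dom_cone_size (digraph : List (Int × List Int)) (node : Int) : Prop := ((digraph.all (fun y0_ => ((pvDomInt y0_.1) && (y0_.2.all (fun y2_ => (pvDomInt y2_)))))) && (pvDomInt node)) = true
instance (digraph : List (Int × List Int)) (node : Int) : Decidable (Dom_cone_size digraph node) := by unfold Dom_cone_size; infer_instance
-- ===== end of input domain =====

-- B replaces the explicit-stack DFS by a frontier-based level BFS in whole-set operations (alternative decomposition, same asymptotics); equivalence is about the return value only (neither program mutates its arguments).

-- digraph[v] (both Pythons): dict lookup, totalized with [] — Pre_ excludes the KeyError inputs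
def pyChildren (digraph : List (Int × List Int)) (v : Int) : List Int :=
  (PySem.Dict.mk digraph).getD v []

-- ===== PORT A =====
-- the inner 'for child in digraph[cur]' loop of A
def coneStep (visited : PySem.Set Int) (stack : List Int) (cs : List Int) :
    PySem.Set Int × List Int :=
  cs.foldl (fun p c =>
    if PySem.Set.contains p.1 c then p else (PySem.Set.add p.1 c, c :: p.2))
    (visited, stack)

-- A's while loop; stack head = Python stack's end (pop(-1)/append); fuel is a
-- termination guard only, proved sufficient on every input
def coneLoop (digraph : List (Int × List Int)) :
    Nat → PySem.Set Int → List Int → PySem.Set Int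
  | 0, visited, _ => visited
  | fuel+1, visited, stack =>
    match stack with
    | [] => visited
    | cur :: rest =>
      let p := coneStep visited rest (pyChildren digraph cur)
      coneLoop digraph fuel p.1 p.2

def cone_size (digraph : List (Int × List Int)) (node : Int) : Int :=
  PySem.Set.len (coneLoop digraph
    (node :: digraph.flatMap (fun p => p.2)).length
    (PySem.Set.ofList [node]) [node])

-- ===== PORT B =====
-- B's while loop: frontier = {c for v in frontier for c in digraph[v]} - visited;
-- visited |= frontier.  Fuel is a termination guard only, proved sufficient.
def bfsLoop (digraph : List (Int × List Int)) :
    Nat → PySem.Set Int → PySem.Set Int → PySem.Set Int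
  | 0, visited, _ => visited
  | fuel+1, visited, frontier =>
    if frontier = [] then visited
    else
      let newf := PySem.Set.diff
        (PySem.Set.ofList (frontier.flatMap (pyChildren digraph))) visited
      bfsLoop digraph fuel (PySem.Set.union visited newf) newf

def cone_size_alt (digraph : List (Int × List Int)) (node : Int) : Int :=
  PySem.Set.len (bfsLoop digraph
    ((node :: digraph.flatMap (fun p => p.2)).length + 1)
    (PySem.Set.ofList [node]) (PySem.Set.ofList [node]))

-- ===== PRECONDITION & SPEC =====
-- Both Pythons raise KeyError iff some vertex reachable from node is not a dict key;
-- stated in closed form: some set S of keys contains node and is closed under the edges.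
def Pre_cone_size (digraph : List (Int × List Int)) (node : Int) : Prop :=
  ∃ S ∈ (digraph.map (fun p => p.1)).toFinset.powerset,
    node ∈ S ∧ ∀ u ∈ S, ∀ c ∈ (PySem.Dict.mk digraph).getD u [], c ∈ S
instance (digraph : List (Int × List Int)) (node : Int) : Decidable (Pre_cone_size digraph node) := by unfold Pre_cone_size; infer_instance
def pvWitness_cone_size : (List (Int × List Int)) × Int := ([(0, [1]), (1, [0, 2]), (2, [])], 0)

def Spec_cone_size (digraph : List (Int × List Int)) (node : Int) (out : Int) : Prop := out = cone_size_alt digraph node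
instance (digraph : List (Int × List Int)) (node : Int) (out : Int) : Decidable (Spec_cone_size digraph node out) := by unfold Spec_cone_size; infer_instance

-- ===== CLAIM (what is proved, stated in full; the proofs are below) =====
def Claim_equal_cone_size : Prop := ∀ (digraph : List (Int × List Int)) (node : Int), Dom_cone_size digraph node → Pre_cone_size digraph node → Spec_cone_size digraph node (cone_size digraph node)

-- ===== LEMMAS AND PROOFS =====

-- reachability along digraph edges
def Reach (dg : List (Int × List Int)) (a b : Int) : Prop :=
  Relation.ReflTransGen (fun u v => v ∈ pyChildren dg u) a b

-- a finite universe containing everything either loop can ever visit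
def Univ (dg : List (Int × List Int)) (node : Int) : List Int :=
  node :: dg.flatMap (fun p => p.2)

theorem child_mem_univ {dg : List (Int × List Int)} {node u c : Int}
    (h : c ∈ pyChildren dg u) : c ∈ Univ dg node := by
  unfold pyChildren at h
  rw [PySem.Dict.getD_eq_get?_getD] at h
  rcases h' : (PySem.Dict.mk dg).get? u with _ | l
  · rw [h'] at h; simp at h
  · rw [h'] at h
    simp only [Option.getD_some] at h
    have hm : (u, l) ∈ (PySem.Dict.mk dg).items := PySem.Dict.mem_items_of_get?_eq_some _ h'
    have : (u, l) ∈ dg := hm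
    exact List.mem_cons_of_mem _ (List.mem_flatMap.mpr ⟨(u, l), this, h⟩)

theorem nodup_subset_le {l u : List Int} (hn : l.Nodup) (hsub : ∀ x ∈ l, x ∈ u) :
    l.length ≤ u.dedup.length := by
  have h1 : l.toFinset.card = l.length := List.toFinset_card_of_nodup hn
  have h2 : l.toFinset ⊆ u.toFinset := by
    intro x hx; simp only [List.mem_toFinset] at *; exact hsub x hx
  have := Finset.card_le_card h2
  rw [h1, List.card_toFinset] at this
  exact this

theorem reach_iff_of_closed {dg : List (Int × List Int)} {node : Int} {V : List Int}
    (hnode : node ∈ V)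
    (hcl : ∀ u ∈ V, ∀ c ∈ pyChildren dg u, c ∈ V)
    (hr : ∀ x ∈ V, Reach dg node x) :
    ∀ x, x ∈ V ↔ Reach dg node x := by
  intro x
  constructor
  · exact hr x
  · intro h
    induction h with
    | refl => exact hnode
    | tail _ hbc ih => exact hcl _ ih _ hbc

theorem coneStep_mem_fst {v : PySem.Set Int} {st cs : List Int} {x : Int} :
    x ∈ (coneStep v st cs).1 ↔ x ∈ v ∨ x ∈ cs := by
  induction cs generalizing v st with
  | nil => simp [coneStep]
  | cons c cs ih =>
    simp only [coneStep, List.foldl_cons] at *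
    by_cases hc : PySem.Set.contains v c = true
    · have hcm : c ∈ v := (PySem.Set.contains_iff v c).mp hc
      rw [if_pos hc]
      rw [ih]
      constructor
      · rintro (h | h) <;> simp [h]
      · rintro (h | h)
        · exact Or.inl h
        · rcases List.mem_cons.mp h with h | h
          · exact Or.inl (h ▸ hcm)
          · exact Or.inr h
    · rw [if_neg hc]
      rw [ih]
      rw [PySem.Set.mem_add]
      constructor
      · rintro ((h | h) | h) <;> simp [h]
      · rintro (h | h)
        · exact Or.inl (Or.inl h)
        · rcases List.mem_cons.mp h with h | h
          · exact Or.inl (Or.inr h)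
          · exact Or.inr h

theorem coneStep_mem_snd {v : PySem.Set Int} {st cs : List Int} {x : Int} :
    x ∈ (coneStep v st cs).2 ↔ x ∈ st ∨ (x ∈ cs ∧ x ∉ v) := by
  induction cs generalizing v st with
  | nil => simp [coneStep]
  | cons c cs ih =>
    simp only [coneStep, List.foldl_cons] at *
    by_cases hc : PySem.Set.contains v c = true
    · have hcm : c ∈ v := (PySem.Set.contains_iff v c).mp hc
      rw [if_pos hc, ih]
      constructor
      · rintro (h | ⟨h1, h2⟩)
        · exact Or.inl h
        · exact Or.inr ⟨List.mem_cons_of_mem _ h1, h2⟩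
      · rintro (h | ⟨h1, h2⟩)
        · exact Or.inl h
        · rcases List.mem_cons.mp h1 with h1 | h1
          · exact absurd (h1 ▸ hcm) h2
          · exact Or.inr ⟨h1, h2⟩
    · have hcm : c ∉ v := fun h => hc ((PySem.Set.contains_iff v c).mpr h)
      rw [if_neg hc, ih]
      simp only [PySem.Set.mem_add, List.mem_cons]
      constructor
      · rintro ((h | h) | ⟨h1, h2⟩)
        · subst h
          exact Or.inr ⟨Or.inl rfl, hcm⟩
        · exact Or.inl h
        · exact Or.inr ⟨Or.inr h1, fun hv => h2 (Or.inl hv)⟩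
      · rintro (h | ⟨h1 | h1, h2⟩)
        · exact Or.inl (Or.inr h)
        · exact Or.inl (Or.inl h1)
        · by_cases hxc : x = c
          · exact Or.inl (Or.inl hxc)
          · exact Or.inr ⟨h1, by rintro (h | h); exact h2 h; exact hxc h⟩

theorem coneStep_nodup {v : PySem.Set Int} {st cs : List Int} (hv : v.Nodup) :
    (coneStep v st cs).1.Nodup := by
  induction cs generalizing v st with
  | nil => exact hv
  | cons c cs ih =>
    simp only [coneStep, List.foldl_cons] at *
    by_cases hc : PySem.Set.contains v c = true
    · rw [if_pos hc]; exact ih hv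
    · rw [if_neg hc]; exact ih (PySem.Set.nodup_add _ _ hv)

theorem coneStep_len {v : PySem.Set Int} {st cs : List Int} :
    (coneStep v st cs).1.length + st.length = (coneStep v st cs).2.length + v.length := by
  induction cs generalizing v st with
  | nil => simp [coneStep]; omega
  | cons c cs ih =>
    simp only [coneStep, List.foldl_cons] at *
    by_cases hc : PySem.Set.contains v c = true
    · rw [if_pos hc]; exact ih
    · have hcm : c ∉ v := fun h => hc ((PySem.Set.contains_iff v c).mpr h)
      rw [if_neg hc]
      have h1 := @ih (PySem.Set.add v c) (c :: st)
      have h2 : (PySem.Set.add v c).length = v.length + 1 := by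
        rw [PySem.Set.add_of_not_mem hcm]; simp
      simp only [List.length_cons] at h1 ⊢
      omega

theorem coneStep_len_ge {v : PySem.Set Int} {st cs : List Int} :
    v.length ≤ (coneStep v st cs).1.length := by
  induction cs generalizing v st with
  | nil => simp [coneStep]
  | cons c cs ih =>
    simp only [coneStep, List.foldl_cons] at *
    by_cases hc : PySem.Set.contains v c = true
    · rw [if_pos hc]; exact ih
    · have hcm : c ∉ v := fun h => hc ((PySem.Set.contains_iff v c).mpr h)
      rw [if_neg hc]
      calc v.length ≤ (PySem.Set.add v c).length := by
            rw [PySem.Set.add_of_not_mem hcm]; simp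
        _ ≤ _ := ih

theorem coneLoop_spec (dg : List (Int × List Int)) (node : Int) :
    ∀ (fuel : Nat) (v : PySem.Set Int) (st : List Int),
    v.Nodup →
    node ∈ v →
    (∀ x ∈ st, x ∈ v) →
    (∀ x ∈ v, Reach dg node x) →
    (∀ u ∈ v, u ∉ st → ∀ c ∈ pyChildren dg u, c ∈ v) →
    (∀ x ∈ v, x ∈ Univ dg node) →
    st.length + (Univ dg node).dedup.length ≤ fuel + v.length →
    (coneLoop dg fuel v st).Nodup ∧
      ∀ x, x ∈ coneLoop dg fuel v st ↔ Reach dg node x := by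
  intro fuel
  induction fuel with
  | zero =>
    intro v st hv hnode hst hr hcl hu hfuel
    have hD : v.length ≤ (Univ dg node).dedup.length := nodup_subset_le hv hu
    have hst0 : st = [] := by
      cases st with
      | nil => rfl
      | cons a l => exfalso; simp only [List.length_cons] at hfuel; omega
    subst hst0
    refine ⟨hv, reach_iff_of_closed hnode (fun u hu' => hcl u hu' (by simp)) hr⟩
  | succ fuel ih =>
    intro v st hv hnode hst hr hcl hu hfuel
    cases st with
    | nil =>
      refine ⟨hv, reach_iff_of_closed hnode (fun u hu' => hcl u hu' (by simp)) hr⟩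
    | cons cur rest =>
      show (coneLoop dg fuel (coneStep v rest (pyChildren dg cur)).1
        (coneStep v rest (pyChildren dg cur)).2).Nodup ∧ _
      set cs := pyChildren dg cur with hcs
      have hcur : cur ∈ v := hst cur (by simp)
      have hD : v.length ≤ (Univ dg node).dedup.length :=
        nodup_subset_le hv hu
      have hD' : (coneStep v rest cs).1.length ≤ (Univ dg node).dedup.length := by
        refine nodup_subset_le (coneStep_nodup hv) ?_
        intro x hx
        rcases coneStep_mem_fst.mp hx with h | h
        · exact hu x h
        · exact child_mem_univ h
      refine ih _ _ (coneStep_nodup hv) (coneStep_mem_fst.mpr (Or.inl hnode)) ?_ ?_ ?_ ?_ ?_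
      · intro x hx
        rcases coneStep_mem_snd.mp hx with h | ⟨h, _⟩
        · exact coneStep_mem_fst.mpr (Or.inl (hst x (List.mem_cons_of_mem _ h)))
        · exact coneStep_mem_fst.mpr (Or.inr h)
      · intro x hx
        rcases coneStep_mem_fst.mp hx with h | h
        · exact hr x h
        · exact Relation.ReflTransGen.tail (hr cur hcur) h
      · intro u hu' hnst c hc
        rcases coneStep_mem_fst.mp hu' with h | h
        · by_cases hcu : u = cur
          · subst hcu
            exact coneStep_mem_fst.mpr (Or.inr hc)
          · have : u ∉ rest := fun hrest => hnst (coneStep_mem_snd.mpr (Or.inl hrest))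
            have : u ∉ cur :: rest := by
              intro hm; rcases List.mem_cons.mp hm with hm | hm
              exacts [hcu hm, this hm]
            exact coneStep_mem_fst.mpr (Or.inl (hcl u h this c hc))
        · by_cases hvv : u ∈ v
          · by_cases hcu : u = cur
            · subst hcu
              exact coneStep_mem_fst.mpr (Or.inr hc)
            · have : u ∉ rest := fun hrest => hnst (coneStep_mem_snd.mpr (Or.inl hrest))
              have : u ∉ cur :: rest := by
                intro hm; rcases List.mem_cons.mp hm with hm | hm
                exacts [hcu hm, this hm]
              exact coneStep_mem_fst.mpr (Or.inl (hcl u hvv this c hc))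
          · exact absurd (coneStep_mem_snd.mpr (Or.inr ⟨h, hvv⟩)) hnst
      · intro x hx
        rcases coneStep_mem_fst.mp hx with h | h
        · exact hu x h
        · exact child_mem_univ h
      · have hlen := @coneStep_len v rest cs
        have hge := @coneStep_len_ge v rest cs
        simp only [List.length_cons] at hfuel
        omega

theorem bfsLoop_spec (dg : List (Int × List Int)) (node : Int) :
    ∀ (fuel : Nat) (v f : PySem.Set Int),
    v.Nodup →
    node ∈ v →
    (∀ x ∈ f, x ∈ v) →
    (∀ x ∈ v, Reach dg node x) →
    (∀ u ∈ v, u ∉ f → ∀ c ∈ pyChildren dg u, c ∈ v) →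
    (∀ x ∈ v, x ∈ Univ dg node) →
    (f ≠ [] → (Univ dg node).dedup.length + 1 ≤ v.length + fuel) →
    (bfsLoop dg fuel v f).Nodup ∧
      ∀ x, x ∈ bfsLoop dg fuel v f ↔ Reach dg node x := by
  intro fuel
  induction fuel with
  | zero =>
    intro v f hv hnode hf hr hcl hu hfuel
    have hD : v.length ≤ (Univ dg node).dedup.length := nodup_subset_le hv hu
    have hf0 : f = [] := by
      by_contra h
      have := hfuel h
      omega
    subst hf0
    exact ⟨hv, reach_iff_of_closed hnode (fun u hu' => hcl u hu' (by simp)) hr⟩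
  | succ fuel ih =>
    intro v f hv hnode hf hr hcl hu hfuel
    by_cases hfe : f = []
    · subst hfe
      have heq : bfsLoop dg (fuel+1) v [] = v := by simp [bfsLoop]
      rw [heq]
      exact ⟨hv, reach_iff_of_closed hnode (fun u hu' => hcl u hu' (by simp)) hr⟩
    · have heq : bfsLoop dg (fuel+1) v f = bfsLoop dg fuel
          (PySem.Set.union v (PySem.Set.diff (PySem.Set.ofList (f.flatMap (pyChildren dg))) v))
          (PySem.Set.diff (PySem.Set.ofList (f.flatMap (pyChildren dg))) v) := by
        conv_lhs => rw [bfsLoop]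
        rw [if_neg hfe]
      rw [heq]
      set newf := PySem.Set.diff (PySem.Set.ofList (f.flatMap (pyChildren dg))) v with hnf
      have hmem_newf : ∀ x, x ∈ newf ↔ (∃ u ∈ f, x ∈ pyChildren dg u) ∧ x ∉ v := by
        intro x
        rw [hnf, PySem.Set.mem_diff, PySem.Set.mem_ofList, List.mem_flatMap]
      have hmem_v' : ∀ x, x ∈ PySem.Set.union v newf ↔ x ∈ v ∨ x ∈ newf := fun x =>
        PySem.Set.mem_union _ _ _
      refine ih (PySem.Set.union v newf) newf (PySem.Set.nodup_union _ _ hv)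
        ((hmem_v' node).mpr (Or.inl hnode)) ?_ ?_ ?_ ?_ ?_
      · intro x hx; exact (hmem_v' x).mpr (Or.inr hx)
      · intro x hx
        rcases (hmem_v' x).mp hx with h | h
        · exact hr x h
        · rcases (hmem_newf x).mp h with ⟨⟨u, huf, hc⟩, _⟩
          exact Relation.ReflTransGen.tail (hr u (hf u huf)) hc
      · intro u hu' hnnf c hc
        rcases (hmem_v' u).mp hu' with h | h
        · by_cases huf : u ∈ f
          · by_cases hcv : c ∈ v
            · exact (hmem_v' c).mpr (Or.inl hcv)
            · exact (hmem_v' c).mpr (Or.inr ((hmem_newf c).mpr ⟨⟨u, huf, hc⟩, hcv⟩))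
          · exact (hmem_v' c).mpr (Or.inl (hcl u h huf c hc))
        · exact absurd h hnnf
      · intro x hx
        rcases (hmem_v' x).mp hx with h | h
        · exact hu x h
        · rcases (hmem_newf x).mp h with ⟨⟨u, _, hc⟩, _⟩
          exact child_mem_univ hc
      · intro hne
        have hsub : v.toFinset ⊂ (PySem.Set.union v newf).toFinset := by
          constructor
          · intro x hx
            rw [List.mem_toFinset] at *
            exact (hmem_v' x).mpr (Or.inl hx)
          · intro hcon
            rcases List.exists_mem_of_ne_nil newf hne with ⟨w, hw⟩
            have hwv' : w ∈ (PySem.Set.union v newf).toFinset := by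
              rw [List.mem_toFinset]; exact (hmem_v' w).mpr (Or.inr hw)
            have := hcon hwv'
            rw [List.mem_toFinset] at this
            exact ((hmem_newf w).mp hw).2 this
        have hlt : v.toFinset.card < (PySem.Set.union v newf).toFinset.card :=
          Finset.card_lt_card hsub
        rw [List.toFinset_card_of_nodup hv,
          List.toFinset_card_of_nodup (PySem.Set.nodup_union _ _ hv)] at hlt
        have := hfuel hfe
        omega

theorem univ_dedup_le (dg : List (Int × List Int)) (node : Int) :
    (Univ dg node).dedup.length ≤ (Univ dg node).length :=
  (List.dedup_sublist _).length_le

-- ===== VERDICT (by name: the statement is the Claim_ definition above) =====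
theorem cone_size_spec : Claim_equal_cone_size := by
  intro dg node _ _
  unfold Spec_cone_size cone_size cone_size_alt
  have hA := coneLoop_spec dg node
    (node :: dg.flatMap (fun p => p.2)).length
    (PySem.Set.ofList [node]) [node]
    (by simp [PySem.Set.ofList]) (by simp [PySem.Set.ofList])
    (by simp [PySem.Set.ofList])
    (by
      intro x hx
      simp [PySem.Set.ofList] at hx
      subst hx
      exact Relation.ReflTransGen.refl)
    (by
      intro u hu hnst
      simp [PySem.Set.ofList] at hu
      subst hu
      simp at hnst)
    (by
      intro x hx
      simp [PySem.Set.ofList] at hx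
      subst hx
      exact List.mem_cons_self)
    (by
      have h2 := univ_dedup_le dg node
      have h3 : PySem.Set.ofList [node] = [node] := rfl
      simp only [Univ] at h2 ⊢
      rw [h3]
      simp only [List.length_cons, List.length_nil] at h2 ⊢
      omega)
  have hB := bfsLoop_spec dg node
    ((node :: dg.flatMap (fun p => p.2)).length + 1)
    (PySem.Set.ofList [node]) (PySem.Set.ofList [node])
    (by simp [PySem.Set.ofList]) (by simp [PySem.Set.ofList])
    (fun x hx => hx)
    (by
      intro x hx
      simp [PySem.Set.ofList] at hx
      subst hx
      exact Relation.ReflTransGen.refl)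
    (by
      intro u hu hnf
      simp [PySem.Set.ofList] at hu
      subst hu
      simp [PySem.Set.ofList] at hnf)
    (by
      intro x hx
      simp [PySem.Set.ofList] at hx
      subst hx
      exact List.mem_cons_self)
    (by
      intro _
      have h2 := univ_dedup_le dg node
      have h3 : PySem.Set.ofList [node] = [node] := rfl
      simp only [Univ] at h2 ⊢
      rw [h3]
      simp only [List.length_cons, List.length_nil] at h2 ⊢
      omega)
  obtain ⟨hAn, hAm⟩ := hA
  obtain ⟨hBn, hBm⟩ := hB
  have hperm : (coneLoop dg (node :: dg.flatMap (fun p => p.2)).length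
      (PySem.Set.ofList [node]) [node]).Perm
      (bfsLoop dg ((node :: dg.flatMap (fun p => p.2)).length + 1)
      (PySem.Set.ofList [node]) (PySem.Set.ofList [node])) := by
    rw [List.perm_ext_iff_of_nodup hAn hBn]
    intro x
    rw [hAm x, hBm x]
  simp only [PySem.Set.len, hperm.length_eq]
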